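-- pv_equiv track=rewrite | github.com/probably-jb/AdventOfCode | 2024/02/Part 1.py | is_safe_descending
-- ===== SOURCE A (Python) =====
-- def is_safe_descending(items):
--     for i in range(len(items) - 1):
--         if items != sorted(items, reverse=True):
--             return False
--         distance = abs(items[i] - items[i + 1])
--         if distance < 1 or distance > 3:
--             return False
--     return True
-- ===== SOURCE B (Python) =====
-- def is_safe_descending(items):
--     return all(1 <= a - b <= 3 for a, b in zip(items, items[1:]))
-- ===== Notes on version B (the rewrite author's own statement) =====
-- stated objective: faster
-- what changed: Replaced the loop that re-sorts the whole list and rechecks abs-distance at every index with a single linear pass over adjacent pairs checking 1 <= a-b <= 3, which implies the descending order for free.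
import Mathlib
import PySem

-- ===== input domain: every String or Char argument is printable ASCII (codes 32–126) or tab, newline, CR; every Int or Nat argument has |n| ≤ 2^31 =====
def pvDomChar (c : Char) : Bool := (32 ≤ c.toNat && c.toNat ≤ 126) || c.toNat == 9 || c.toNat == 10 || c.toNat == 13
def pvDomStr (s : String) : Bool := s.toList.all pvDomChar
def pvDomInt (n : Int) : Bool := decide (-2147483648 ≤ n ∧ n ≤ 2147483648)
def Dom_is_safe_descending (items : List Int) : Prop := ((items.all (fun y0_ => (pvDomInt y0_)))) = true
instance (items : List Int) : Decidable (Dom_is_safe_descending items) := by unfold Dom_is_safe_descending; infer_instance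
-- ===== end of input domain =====

-- B replaces A's per-index re-sort + abs-distance check with one linear pass over
-- adjacent pairs checking 1 ≤ a - b ≤ 3 (objective: faster, asymptotically).

-- ===== PORT A =====
-- A's loop 'for i in range(len(items) - 1)' with early returns; sorted(items, reverse=True)
-- is recomputed inside the loop body exactly as in the Python.
def pvALoop (items : List Int) : List Int → Bool
  | [] => true
  | i :: rest =>
    if items ≠ PySem.List.sorted items (fun x => x) true then false
    else
      let distance : Int := |PySem.List.pyGetD items i 0 - PySem.List.pyGetD items (i + 1) 0|
      if distance < 1 ∨ distance > 3 then false
      else pvALoop items rest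

def is_safe_descending (items : List Int) : Bool :=
  pvALoop items (PySem.List.pyRange 0 ((items.length : Int) - 1) 1)

-- ===== PORT B =====
-- all(1 <= a - b <= 3 for a, b in zip(items, items[1:]))
def is_safe_descending_alt (items : List Int) : Bool :=
  (items.zip (PySem.List.slice items (some 1) none)).all
    (fun p => decide (1 ≤ p.1 - p.2 ∧ p.1 - p.2 ≤ 3))

-- ===== PRECONDITION & SPEC =====
def Spec_is_safe_descending (items : List Int) (out : Bool) : Prop := out = is_safe_descending_alt items
instance (items : List Int) (out : Bool) : Decidable (Spec_is_safe_descending items out) := by unfold Spec_is_safe_descending; infer_instance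

-- ===== CLAIM (what is proved, stated in full; the proofs are below) =====
def Claim_equal_is_safe_descending : Prop := ∀ (items : List Int), Dom_is_safe_descending items → Spec_is_safe_descending items (is_safe_descending items)

-- ===== LEMMAS AND PROOFS =====

-- B = true iff adjacent pairs satisfy 1 ≤ a - b ≤ 3, as an IsChain.
theorem alt_iff_chain (items : List Int) :
    is_safe_descending_alt items = true ↔
      items.IsChain (fun a b => 1 ≤ a - b ∧ a - b ≤ 3) := by
  unfold is_safe_descending_alt
  rw [PySem.List.slice_from_one]
  induction items with
  | nil => simpa using List.IsChain.nil
  | cons a t ih =>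
      cases t with
      | nil => simpa using List.isChain_singleton a
      | cons b u =>
          rw [List.tail_cons] at ih ⊢
          rw [List.zip_cons_cons, List.all_cons, Bool.and_eq_true, decide_eq_true_eq,
            List.isChain_cons_cons, ih]

-- items == sorted(items, reverse=True) iff items is adjacent-wise non-increasing.
theorem sorted_guard_iff (items : List Int) :
    items = PySem.List.sorted items (fun x => x) true ↔
      items.IsChain (fun a b => b ≤ a) := by
  constructor
  · intro h
    have hp := PySem.List.sorted_pairwise_rev (xs := items) (key := fun x => x)
    rw [← h] at hp
    exact hp.isChain
  · intro h
    have ht : Trans (fun a b : Int => b ≤ a) (fun a b : Int => b ≤ a) (fun a b : Int => b ≤ a) :=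
      ⟨fun hab hbc => le_trans hbc hab⟩
    have hp : items.Pairwise (fun a b : Int => b ≤ a) := (@List.isChain_iff_pairwise _ _ _ ht).mp h
    exact (PySem.List.sorted_rev_eq_self_of_pairwise items (fun x => x) hp).symm

-- When the sorted guard passes, A's loop is an 'all' over its index list.
theorem aloop_eq_all (items : List Int)
    (hs : items = PySem.List.sorted items (fun x => x) true) (is : List Int) :
    pvALoop items is = is.all (fun i =>
      !(decide (|PySem.List.pyGetD items i 0 - PySem.List.pyGetD items (i + 1) 0| < 1 ∨
        |PySem.List.pyGetD items i 0 - PySem.List.pyGetD items (i + 1) 0| > 3))) := by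
  induction is with
  | nil => rfl
  | cons i rest ih =>
      rw [pvALoop, if_neg (not_not_intro hs), List.all_cons]
      by_cases hd : (|PySem.List.pyGetD items i 0 - PySem.List.pyGetD items (i + 1) 0| < 1 ∨
          |PySem.List.pyGetD items i 0 - PySem.List.pyGetD items (i + 1) 0| > 3)
      · rw [if_pos hd, decide_eq_true hd]
        rfl
      · rw [if_neg hd, ih, decide_eq_false hd]
        rfl

-- A = true iff adjacent pairs satisfy 1 ≤ a - b ≤ 3.
theorem a_iff_chain (items : List Int) :
    is_safe_descending items = true ↔
      items.IsChain (fun a b => 1 ≤ a - b ∧ a - b ≤ 3) := by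
  unfold is_safe_descending
  rcases items with _ | ⟨a, _ | ⟨b, u⟩⟩
  · rw [PySem.List.pyRange_one_eq_nil (by norm_num)]
    simpa [pvALoop] using List.IsChain.nil
  · rw [PySem.List.pyRange_one_eq_nil (by norm_num)]
    simpa [pvALoop] using List.isChain_singleton a
  · set items := a :: b :: u with hit
    have hlen : 2 ≤ items.length := by simp [hit]
    have hrange : (0 : Int) < (items.length : Int) - 1 := by omega
    constructor
    · intro hA
      -- the loop ran at least once, so the guard must have passed
      have hs : items = PySem.List.sorted items (fun x => x) true := by
        by_contra hne
        rw [PySem.List.pyRange_one_cons hrange, pvALoop, if_pos hne] at hA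
        simp at hA
      have hdesc : items.IsChain (fun a b => b ≤ a) := (sorted_guard_iff items).1 hs
      rw [aloop_eq_all items hs] at hA
      rw [List.isChain_iff_getElem]
      intro i hi
      have hmem : ((i : Int)) ∈ PySem.List.pyRange 0 ((items.length : Int) - 1) 1 := by
        rw [PySem.List.mem_pyRange_one]
        refine ⟨Int.natCast_nonneg i, by omega⟩
      have hall := List.all_eq_true.mp hA _ hmem
      simp only [Bool.not_eq_eq_eq_not, Bool.not_true, decide_eq_false_iff_not] at hall
      push Not at hall
      have hg1 : PySem.List.pyGetD items ((i : Int)) 0 = items[i] := by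
        rw [PySem.List.pyGetD_eq_getElem items 0 (Int.natCast_nonneg i) (by omega)]
        simp
      have hg2 : PySem.List.pyGetD items ((i : Int) + 1) 0 = items[i + 1] := by
        rw [PySem.List.pyGetD_eq_getElem items 0 (by positivity) (by omega)]
        congr 1
      rw [hg1, hg2] at hall
      -- non-increasing fixes the sign of the abs
      have hd : items[i + 1] ≤ items[i] := List.isChain_iff_getElem.mp hdesc i hi
      rw [abs_of_nonneg (by omega)] at hall
      omega
    · intro hP
      have hdesc : items.IsChain (fun a b => b ≤ a) := hP.imp (fun h => by omega)
      have hs : items = PySem.List.sorted items (fun x => x) true :=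
        (sorted_guard_iff items).2 hdesc
      rw [aloop_eq_all items hs, List.all_eq_true]
      intro x hx
      rw [PySem.List.mem_pyRange_one] at hx
      obtain ⟨hx0, hx1⟩ := hx
      obtain ⟨i, rfl⟩ : ∃ i : ℕ, (i : Int) = x := ⟨x.toNat, by omega⟩
      have hi : i + 1 < items.length := by omega
      have hchain := List.isChain_iff_getElem.mp hP i hi
      have hg1 : PySem.List.pyGetD items ((i : Int)) 0 = items[i] := by
        rw [PySem.List.pyGetD_eq_getElem items 0 (Int.natCast_nonneg i) (by omega)]
        simp
      have hg2 : PySem.List.pyGetD items ((i : Int) + 1) 0 = items[i + 1] := by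
        rw [PySem.List.pyGetD_eq_getElem items 0 (by positivity) (by omega)]
        congr 1
      simp only [Bool.not_eq_eq_eq_not, Bool.not_true, decide_eq_false_iff_not]
      rw [hg1, hg2, abs_of_nonneg (by omega)]
      push Not
      omega

-- ===== VERDICT (by name: the statement is the Claim_ definition above) =====
theorem is_safe_descending_spec : Claim_equal_is_safe_descending := by
  intro items _
  unfold Spec_is_safe_descending
  rw [Bool.eq_iff_iff, a_iff_chain, alt_iff_chain]
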